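-- pv_equiv track=rewrite | github.com/Sungho-Wi/backjuns | Python/카카오_2021_프로그래밍2.py | find
-- ===== SOURCE A (Python) =====
-- def find(order, index, curr_num, max_num):
--     if curr_num == max_num:
--         return [order[index]]
--
--     str_list = []
--
--     for i in range(index, len(order)):
--         if max_num - curr_num > (len(order) - 1) - i:
--             break
--         find_values = find(order, i + 1, curr_num + 1, max_num)
--         for find_value in find_values:
--             str_list.append(order[index] + find_value)
--
--     return str_list
-- ===== SOURCE B (Python) =====
-- def find(order, index, curr_num, max_num):
--     n = len(order)
--     r = max_num - curr_num
--     if index < 0 or index >= n or r < 0 or r > (n - 1) - index: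
--         return []
--     # bottom-up DP: dp[j] = all combination strings that start with order[j]
--     # and pick k further elements with strictly increasing indices
--     dp = [[order[j]] for j in range(n)]
--     for k in range(1, r + 1):
--         dp = [[order[j] + s for i in range(j + 1, n - k + 1) for s in dp[i]]
--               for j in range(n)]
--     return dp[index]
-- ===== Notes on version B (the rewrite author's own statement) =====
-- stated objective: alternative
-- what changed: replaces A's top-down recursion (which recomputes the same (start,depth) subproblem once per parent) with an iterative bottom-up DP table dp[j] over remaining-count levels, each subproblem list built exactly once
-- outside the precondition, e.g. on find(['a', 'b'], -1, 0, 0): A returns ['b'], B returns []; on find(['a'], -3, 1, 0): A returns [], B returns []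
import Mathlib
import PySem

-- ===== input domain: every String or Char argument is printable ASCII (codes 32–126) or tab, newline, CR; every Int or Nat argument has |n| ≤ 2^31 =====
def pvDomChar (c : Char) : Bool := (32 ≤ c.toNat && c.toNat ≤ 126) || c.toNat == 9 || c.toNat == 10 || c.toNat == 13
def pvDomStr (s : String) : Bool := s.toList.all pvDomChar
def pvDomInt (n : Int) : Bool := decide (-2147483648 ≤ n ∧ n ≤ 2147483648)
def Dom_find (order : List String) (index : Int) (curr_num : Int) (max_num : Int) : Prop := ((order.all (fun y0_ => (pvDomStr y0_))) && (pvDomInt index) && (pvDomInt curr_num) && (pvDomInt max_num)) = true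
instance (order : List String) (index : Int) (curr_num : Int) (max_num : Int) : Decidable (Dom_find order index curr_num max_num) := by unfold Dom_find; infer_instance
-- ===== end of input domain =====

-- B replaces A's top-down recursion (which recomputes shared (start,depth) subproblems)
-- by an iterative bottom-up DP that builds each subproblem list exactly once (objective: alternative).

-- ===== PORT A =====
-- the 'for i in range(index, len(order))' loop with its 'break'; len1 = len(order) - 1,
-- rec j = the recursive call find(order, j, curr_num + 1, max_num)
def findGo (len1 : Int) (curr_num : Int) (max_num : Int) (pfx : String)
    (rec : Int → List String) : List Int → List String
  | [] => []
  | i :: rest =>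
      if max_num - curr_num > len1 - i then []
      else ((rec (i + 1)).map (fun v => pfx ++ v)) ++
        findGo len1 curr_num max_num pfx rec rest

-- fuel-based transcription of A's recursion; the fuel chosen in 'find' below always
-- suffices on the inputs admitted by Pre_find (order[index] is pyGetD, exact under Pre_)
def findFuel : Nat → List String → Int → Int → Int → List String
  | 0, _, _, _, _ => []
  | Nat.succ fuel, order, index, curr_num, max_num =>
      if curr_num = max_num then [PySem.List.pyGetD order index ""]
      else
        findGo ((order.length : Int) - 1) curr_num max_num
          (PySem.List.pyGetD order index "")
          (fun j => findFuel fuel order j (curr_num + 1) max_num)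
          (PySem.List.pyRange index (order.length : Int) 1)

def find (order : List String) (index : Int) (curr_num : Int) (max_num : Int) : List String :=
  findFuel ((order.length : Int) + 1 - index).toNat order index curr_num max_num

-- ===== PORT B =====
def find_alt (order : List String) (index : Int) (curr_num : Int) (max_num : Int) : List String :=
  let n : Int := (order.length : Int)
  let r : Int := max_num - curr_num
  if index < 0 ∨ n ≤ index ∨ r < 0 ∨ r > (n - 1) - index then []
  else
    let dp0 : List (List String) :=
      (PySem.List.pyRange 0 n 1).map (fun j => [PySem.List.pyGetD order j ""])
    let dp : List (List String) :=
      (PySem.List.pyRange 1 (r + 1) 1).foldl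
        (fun dp k =>
          (PySem.List.pyRange 0 n 1).map (fun j =>
            (PySem.List.pyRange (j + 1) (n - k + 1) 1).flatMap
              (fun i => (PySem.List.pyGetD dp i []).map
                (fun s => (PySem.List.pyGetD order j "") ++ s)))) dp0
    PySem.List.pyGetD dp index []

-- ===== PRECONDITION & SPEC =====
-- Pre_ restricts to the function's natural domain — a nonnegative start index, in range
-- whenever curr_num = max_num (the base case reads order[index], raising IndexError out of
-- range): for negative index A raises IndexError or returns concatenations produced by
-- Python's negative-index wraparound (on the sub-cases where its loop breaks at once or
-- recurses into nothing it returns [], as B does there too).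
def Pre_find (order : List String) (index : Int) (curr_num : Int) (max_num : Int) : Prop :=
  0 ≤ index ∧ (curr_num = max_num → index < (order.length : Int))
instance (order : List String) (index : Int) (curr_num : Int) (max_num : Int) : Decidable (Pre_find order index curr_num max_num) := by unfold Pre_find; infer_instance

def pvWitness_find : List String × Int × Int × Int := (["a", "b", "c"], 0, 0, 1)

def Spec_find (order : List String) (index : Int) (curr_num : Int) (max_num : Int) (out : List String) : Prop := out = find_alt order index curr_num max_num
instance (order : List String) (index : Int) (curr_num : Int) (max_num : Int) (out : List String) : Decidable (Spec_find order index curr_num max_num out) := by unfold Spec_find; infer_instance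

-- ===== CLAIM (what is proved, stated in full; the proofs are below) =====
def Claim_equal_find : Prop := ∀ (order : List String) (index : Int) (curr_num : Int) (max_num : Int), Dom_find order index curr_num max_num → Pre_find order index curr_num max_num → Spec_find order index curr_num max_num (find order index curr_num max_num)

-- ===== LEMMAS AND PROOFS =====

-- reference function: Gfun order k j = all strings order[j] ++ … obtained by picking k
-- further elements at strictly increasing indices, in lexicographic index order
def Gfun (order : List String) : Nat → Int → List String
  | 0, j => [PySem.List.pyGetD order j ""]
  | k + 1, j =>
      (PySem.List.pyRange (j + 1) ((order.length : Int) - k) 1).flatMap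
        (fun i => (Gfun order k i).map (fun s => (PySem.List.pyGetD order j "") ++ s))

theorem flatMap_congr_mem {α β : Type} {l : List α} {f g : α → List β}
    (h : ∀ x ∈ l, f x = g x) : l.flatMap f = l.flatMap g := by
  induction l with
  | nil => rfl
  | cons a t ih =>
      simp only [List.flatMap_cons]
      rw [h a (by simp), ih (fun x hx => h x (by simp [hx]))]

theorem findFuel_gt (fuel : Nat) (order : List String) (index curr_num max_num : Int)
    (h : max_num < curr_num) : findFuel fuel order index curr_num max_num = [] := by
  induction fuel generalizing index curr_num with
  | zero => rfl
  | succ fuel ih =>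
      have hne : ¬ curr_num = max_num := by omega
      simp only [findFuel, if_neg hne]
      generalize PySem.List.pyRange index (order.length : Int) 1 = l
      induction l with
      | nil => rfl
      | cons i rest ihl =>
          simp only [findGo]
          split
          · rfl
          · rw [ih (i + 1) (curr_num + 1) (by omega), ihl]
            rfl

theorem findGo_eq_takeWhile (len1 curr_num max_num : Int) (pfx : String)
    (rec : Int → List String) (l : List Int) :
    findGo len1 curr_num max_num pfx rec l =
      (l.takeWhile (fun i => decide (i < len1 - (max_num - curr_num) + 1))).flatMap
        (fun i => (rec (i + 1)).map (fun v => pfx ++ v)) := by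
  induction l with
  | nil => rfl
  | cons i rest ih =>
      by_cases h : max_num - curr_num > len1 - i
      · rw [List.takeWhile_cons_of_neg (by simp; omega)]
        simp only [findGo, if_pos h, List.flatMap_nil]
      · rw [List.takeWhile_cons_of_pos (by simp; omega)]
        simp only [findGo, if_neg h, List.flatMap_cons, ih]

theorem takeWhile_lt_pyRange_aux (n : Nat) (a b t : Int) (hn : (b - a).toNat = n) :
    (PySem.List.pyRange a b 1).takeWhile (fun i => decide (i < t)) =
      PySem.List.pyRange a (min b t) 1 := by
  induction n generalizing a with
  | zero =>
      rw [PySem.List.pyRange_one_eq_nil (by omega), PySem.List.pyRange_one_eq_nil (by omega)]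
      rfl
  | succ n ihn =>
      rw [PySem.List.pyRange_one_cons (by omega)]
      by_cases hat : a < t
      · rw [List.takeWhile_cons_of_pos (by simpa using hat),
          PySem.List.pyRange_one_cons (show a < min b t by omega)]
        exact congrArg _ (ihn (a + 1) (by omega))
      · rw [List.takeWhile_cons_of_neg (by simpa using hat),
          PySem.List.pyRange_one_eq_nil (by omega)]

theorem takeWhile_lt_pyRange (a b t : Int) :
    (PySem.List.pyRange a b 1).takeWhile (fun i => decide (i < t)) =
      PySem.List.pyRange a (min b t) 1 :=
  takeWhile_lt_pyRange_aux (b - a).toNat a b t rfl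

theorem pyRange_shift (a b : Int) :
    PySem.List.pyRange (a + 1) (b + 1) 1 = (PySem.List.pyRange a b 1).map (fun i => i + 1) := by
  rw [PySem.List.pyRange_one, PySem.List.pyRange_one]
  have h : (b + 1 - (a + 1)).toNat = (b - a).toNat := by omega
  rw [h, List.map_map]
  exact List.map_congr_left (fun k _ => by simp; omega)

theorem findFuel_eq_Gfun (fuel : Nat) (order : List String) (index curr_num max_num : Int)
    (h0 : 0 ≤ index) (hcm : curr_num ≤ max_num)
    (hbase : curr_num = max_num → index < (order.length : Int))
    (hfuel : (order.length : Int) + 1 - index ≤ (fuel : Int)) :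
    findFuel fuel order index curr_num max_num =
      Gfun order (max_num - curr_num).toNat index := by
  induction fuel generalizing index curr_num with
  | zero =>
      by_cases hc : curr_num = max_num
      · exact absurd (hbase hc) (by omega)
      · obtain ⟨k, hk⟩ : ∃ k, (max_num - curr_num).toNat = k + 1 :=
          ⟨(max_num - curr_num).toNat - 1, by omega⟩
        rw [hk]
        simp only [Gfun, findFuel]
        rw [PySem.List.pyRange_one_eq_nil (by omega), List.flatMap_nil]
  | succ fuel ih =>
      by_cases hc : curr_num = max_num
      · simp only [findFuel, if_pos hc]
        rw [show (max_num - curr_num).toNat = 0 by omega]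
        rfl
      · obtain ⟨k, hk⟩ : ∃ k, (max_num - curr_num).toNat = k + 1 :=
          ⟨(max_num - curr_num).toNat - 1, by omega⟩
        have hmc : max_num - curr_num = (k : Int) + 1 := by omega
        simp only [findFuel, if_neg hc]
        rw [findGo_eq_takeWhile, takeWhile_lt_pyRange]
        have hmin : min ((order.length : Int)) ((order.length : Int) - 1 - (max_num - curr_num) + 1)
            = (order.length : Int) - (k : Int) - 1 := by omega
        rw [hmin]
        have hbody : ∀ i ∈ PySem.List.pyRange index ((order.length : Int) - (k : Int) - 1) 1,
            (fun i => (findFuel fuel order (i + 1) (curr_num + 1) max_num).map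
              (fun v => PySem.List.pyGetD order index "" ++ v)) i =
            (fun i => (Gfun order k (i + 1)).map
              (fun v => PySem.List.pyGetD order index "" ++ v)) i := by
          intro i hi
          rw [PySem.List.mem_pyRange_one] at hi
          have := ih (i + 1) (curr_num + 1) (by omega) (by omega) (by omega) (by omega)
          rw [show (max_num - (curr_num + 1)).toNat = k by omega] at this
          simp only [this]
        rw [flatMap_congr_mem hbody, hk]
        simp only [Gfun]
        rw [show (order.length : Int) - (k : Int) = ((order.length : Int) - (k : Int) - 1) + 1
          by ring, pyRange_shift, List.flatMap_map,
          show (order.length : Int) - (k : Int) - 1 + 1 - 1 = (order.length : Int) - (k : Int) - 1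
          by ring]

theorem find_alt_guard_true (order : List String) (index curr_num max_num : Int)
    (h0 : 0 ≤ index) (hcm : curr_num ≤ max_num)
    (hbase : curr_num = max_num → index < (order.length : Int))
    (hg : index < 0 ∨ (order.length : Int) ≤ index ∨ max_num - curr_num < 0 ∨
      max_num - curr_num > ((order.length : Int) - 1) - index) :
    Gfun order (max_num - curr_num).toNat index = [] := by
  have hc : ¬ curr_num = max_num := by
    intro hc
    have := hbase hc
    omega
  obtain ⟨k, hk⟩ : ∃ k, (max_num - curr_num).toNat = k + 1 :=
    ⟨(max_num - curr_num).toNat - 1, by omega⟩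
  have hmc : max_num - curr_num = (k : Int) + 1 := by omega
  rw [hk]
  simp only [Gfun]
  rw [PySem.List.pyRange_one_eq_nil (by omega), List.flatMap_nil]

theorem dp_fold (order : List String) (t : Nat) :
    (PySem.List.pyRange 1 ((t : Int) + 1) 1).foldl
        (fun dp k =>
          (PySem.List.pyRange 0 (order.length : Int) 1).map (fun j =>
            (PySem.List.pyRange (j + 1) ((order.length : Int) - k + 1) 1).flatMap
              (fun i => (PySem.List.pyGetD dp i []).map
                (fun s => (PySem.List.pyGetD order j "") ++ s))))
        ((PySem.List.pyRange 0 (order.length : Int) 1).map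
          (fun j => [PySem.List.pyGetD order j ""])) =
      (PySem.List.pyRange 0 (order.length : Int) 1).map (fun j => Gfun order t j) := by
  induction t with
  | zero =>
      have h : PySem.List.pyRange 1 (((0 : Nat) : Int) + 1) 1 = [] :=
        PySem.List.pyRange_one_eq_nil (by norm_num)
      rw [h]
      rfl
  | succ t ih =>
      push_cast
      rw [PySem.List.pyRange_one_succ_right (by omega), List.foldl_append]
      push_cast at ih
      rw [ih]
      simp only [List.foldl_cons, List.foldl_nil]
      apply List.map_congr_left
      intro j hj
      rw [PySem.List.mem_pyRange_one] at hj
      have hbody : ∀ i ∈ PySem.List.pyRange (j + 1)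
          ((order.length : Int) - ((t : Int) + 1) + 1) 1,
          (fun i => (PySem.List.pyGetD ((PySem.List.pyRange 0 (order.length : Int) 1).map
              (fun j => Gfun order t j)) i []).map
            (fun s => (PySem.List.pyGetD order j "") ++ s)) i =
          (fun i => (Gfun order t i).map
            (fun s => (PySem.List.pyGetD order j "") ++ s)) i := by
        intro i hi
        rw [PySem.List.mem_pyRange_one] at hi
        simp only
        rw [PySem.List.pyGetD_map_pyRange_of_nonneg _ _ _ _ (by omega) (by omega)]
      rw [flatMap_congr_mem hbody]
      simp only [Gfun]
      rw [show (order.length : Int) - ((t : Int) + 1) + 1 = (order.length : Int) - (t : Int)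
        by ring]

-- ===== VERDICT (by name: the statement is the Claim_ definition above) =====
theorem find_spec : Claim_equal_find := by
  intro order index curr_num max_num _ hpre
  obtain ⟨h0, hbase⟩ := hpre
  unfold Spec_find
  by_cases hgt : max_num < curr_num
  · have hA : find order index curr_num max_num = [] :=
      findFuel_gt _ order index curr_num max_num hgt
    rw [hA]
    simp only [find_alt]
    rw [if_pos (Or.inr (Or.inr (Or.inl (by omega))))]
  · have hcm : curr_num ≤ max_num := by omega
    have hA : find order index curr_num max_num = Gfun order (max_num - curr_num).toNat index := by
      unfold find
      exact findFuel_eq_Gfun _ order index curr_num max_num h0 hcm hbase (Int.self_le_toNat _)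
    rw [hA]
    simp only [find_alt]
    by_cases hg : index < 0 ∨ (order.length : Int) ≤ index ∨ max_num - curr_num < 0 ∨
        max_num - curr_num > ((order.length : Int) - 1) - index
    · rw [if_pos hg]
      exact find_alt_guard_true order index curr_num max_num h0 hcm hbase hg
    · rw [if_neg hg]
      push Not at hg
      obtain ⟨hg1, hg2, hg3, hg4⟩ := hg
      obtain ⟨t, ht⟩ : ∃ t : Nat, max_num - curr_num = (t : Int) :=
        ⟨(max_num - curr_num).toNat, by omega⟩
      rw [ht, Int.toNat_natCast, dp_fold order t,
        PySem.List.pyGetD_map_pyRange_of_nonneg _ _ _ _ h0 (by omega)]
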